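-- pv_equiv track=rewrite | github.com/haile01/snyf | snyf/utils/table.py | merged_cells
-- ===== SOURCE A (Python) =====
-- def merged_cells(row_format, col_sizes):
--     cur_sizes = []
--
--     idx = 0
--     merge_cnt = 0
--     for size in col_sizes:
--         merge_cnt -= 1
--         if merge_cnt > 0:
--             cur_sizes[-1] += size + 3 # " | "
--             continue
--
--         row = row_format[idx]
--         if '-' in row:
--             merge_cnt = row.count('-')
--
--         cur_sizes.append(size)
--         idx += 1
--
--     return cur_sizes
-- ===== SOURCE B (Python) =====
-- def merged_cells(row_format, col_sizes):
--     n = len(col_sizes)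
--     cur_sizes = []
--     i = 0
--     idx = 0
--     while i < n:
--         row = row_format[idx]
--         span = row.count('-') or 1
--         j = min(i + span, n)
--         cur_sizes.append(col_sizes[i] + sum(s + 3 for s in col_sizes[i + 1:j]))
--         i = j
--         idx += 1
--     return cur_sizes
-- ===== Notes on version B (the rewrite author's own statement) =====
-- stated objective: alternative
-- what changed: Replaces A's streaming fold with a decrementing merge counter and in-place growth of the last cell by an explicit per-group loop that computes each merged width directly from its span (count of '-') and a slice of col_sizes.
import Mathlib
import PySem

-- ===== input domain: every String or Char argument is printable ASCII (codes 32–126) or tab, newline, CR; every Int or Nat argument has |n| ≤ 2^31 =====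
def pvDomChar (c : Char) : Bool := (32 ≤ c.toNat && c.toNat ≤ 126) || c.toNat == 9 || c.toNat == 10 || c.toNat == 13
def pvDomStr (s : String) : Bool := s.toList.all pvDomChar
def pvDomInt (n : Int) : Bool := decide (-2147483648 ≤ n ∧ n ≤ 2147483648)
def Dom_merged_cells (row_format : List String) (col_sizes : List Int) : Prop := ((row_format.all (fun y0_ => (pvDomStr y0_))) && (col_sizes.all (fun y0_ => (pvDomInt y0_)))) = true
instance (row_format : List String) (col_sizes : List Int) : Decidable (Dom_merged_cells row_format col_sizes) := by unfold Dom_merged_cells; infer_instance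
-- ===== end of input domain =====

-- B computes each merged cell directly from its group (span = count of '-' in the
-- format entry, widths summed over a slice) instead of A's streaming fold with a
-- decrementing merge counter mutating the last appended cell; same cost (objective: alternative).

-- ===== PORT A =====
-- cur_sizes[-1] += v  (A only reaches this when cur_sizes is nonempty)
def pvAddLast (xs : List Int) (v : Int) : List Int :=
  match xs with
  | [] => []
  | [x] => [x + v]
  | x :: rest => x :: pvAddLast rest v

-- one iteration of A's 'for size in col_sizes' loop; state = (cur_sizes, idx, merge_cnt);
-- row_format[idx] via pyGet?; the .getD "" default is only reachable where Python A raises (outside Pre_)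
def pvAStep (row_format : List String) (st : List Int × Int × Int) (size : Int) : List Int × Int × Int :=
  let cur := st.1
  let idx := st.2.1
  let mc := st.2.2 - 1
  if mc > 0 then (pvAddLast cur (size + 3), idx, mc)
  else
    let row := (PySem.List.pyGet? row_format idx).getD ""
    let mc' := if PySem.Str.isIn "-" row then (PySem.Str.count row "-" : Int) else mc
    (cur ++ [size], idx + 1, mc')

def merged_cells (row_format : List String) (col_sizes : List Int) : List Int :=
  (col_sizes.foldl (pvAStep row_format) ([], 0, 0)).1

-- ===== PORT B =====
-- B's while-loop over i, transcribed as recursion on the suffix col_sizes[i:];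
-- span = row.count('-') or 1; col_sizes[i+1:j] is take (span-1) of the suffix (min-clamped as in B)
def pvAltGo (row_format : List String) (idx : Int) (cs : List Int) : List Int :=
  match cs with
  | [] => []
  | s :: rest =>
    let row := (PySem.List.pyGet? row_format idx).getD ""
    let c := PySem.Str.count row "-"
    let span := if c = 0 then 1 else c
    (s + ((rest.take (span - 1)).map (· + 3)).sum) :: pvAltGo row_format (idx + 1) (rest.drop (span - 1))
termination_by cs.length
decreasing_by simp

def merged_cells_alt (row_format : List String) (col_sizes : List Int) : List Int :=
  pvAltGo row_format 0 col_sizes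

-- ===== PRECONDITION & SPEC =====
-- Pre_ excludes exactly the inputs on which Python A raises IndexError (row_format[idx]
-- read past the end): A returns normally iff the total span of row_format covers col_sizes.
def Pre_merged_cells (row_format : List String) (col_sizes : List Int) : Prop :=
  col_sizes.length ≤ (row_format.map (fun r => max (PySem.Str.count r "-") 1)).sum
instance (row_format : List String) (col_sizes : List Int) : Decidable (Pre_merged_cells row_format col_sizes) := by unfold Pre_merged_cells; infer_instance

def pvWitness_merged_cells : List String × List Int := (["--", "a"], [4, 7, 2])

def Spec_merged_cells (row_format : List String) (col_sizes : List Int) (out : List Int) : Prop := out = merged_cells_alt row_format col_sizes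
instance (row_format : List String) (col_sizes : List Int) (out : List Int) : Decidable (Spec_merged_cells row_format col_sizes out) := by unfold Spec_merged_cells; infer_instance

-- ===== CLAIM (what is proved, stated in full; the proofs are below) =====
def Claim_equal_merged_cells : Prop := ∀ (row_format : List String) (col_sizes : List Int), Dom_merged_cells row_format col_sizes → Pre_merged_cells row_format col_sizes → Spec_merged_cells row_format col_sizes (merged_cells row_format col_sizes)

-- ===== LEMMAS AND PROOFS =====

theorem pvAddLast_append (acc : List Int) (c v : Int) :
    pvAddLast (acc ++ [c]) v = acc ++ [c + v] := by
  induction acc with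
  | nil => rfl
  | cons x rest ih =>
    cases rest with
    | nil => simp [pvAddLast]
    | cons y t => simpa [pvAddLast] using ih

theorem pvAddLast_zero (xs : List Int) : pvAddLast xs 0 = xs := by
  induction xs using List.reverseRecOn with
  | nil => rfl
  | append_singleton ys y _ => simp [pvAddLast_append]

theorem pvAddLast_addLast (xs : List Int) (a b : Int) :
    pvAddLast (pvAddLast xs a) b = pvAddLast xs (a + b) := by
  induction xs using List.reverseRecOn with
  | nil => rfl
  | append_singleton ys y _ => simp [pvAddLast_append]; ring

-- Chars.count on a single character is List.count
theorem pvCountGo_dash (fuel : Nat) : ∀ (l : List Char) (acc : Nat), l.length ≤ fuel →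
    PySem.Chars.count.go ['-'] fuel l acc = acc + l.count '-' := by
  induction fuel with
  | zero =>
    intro l acc h
    have : l = [] := List.length_eq_zero_iff.mp (Nat.le_zero.mp h)
    subst this
    simp [PySem.Chars.count.go]
  | succ n ih =>
    intro l acc h
    cases l with
    | nil => simp [PySem.Chars.count.go]
    | cons x t =>
      by_cases hx : x = '-'
      · subst hx
        have : PySem.Chars.count.go ['-'] (n + 1) ('-' :: t) acc
            = PySem.Chars.count.go ['-'] n t (acc + 1) := by
          simp [PySem.Chars.count.go, List.isPrefixOf]
        rw [this, ih t (acc + 1) (by simpa using h), List.count_cons_self]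
        omega
      · have : PySem.Chars.count.go ['-'] (n + 1) (x :: t) acc
            = PySem.Chars.count.go ['-'] n t acc := by
          have hbe : (('-' : Char) == x) = false := beq_eq_false_iff_ne.mpr (Ne.symm hx)
          simp [PySem.Chars.count.go, List.isPrefixOf, hbe]
        rw [this, ih t acc (by simpa using h)]
        rw [List.count_cons_of_ne hx]
theorem pvCount_dash (s : String) : PySem.Str.count s "-" = s.toList.count '-' := by
  rw [show PySem.Str.count s "-" = PySem.Chars.count s.toList ['-'] from rfl]
  unfold PySem.Chars.count
  rw [if_neg (by simp)]
  simpa using pvCountGo_dash s.toList.length s.toList 0 (le_refl _)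
theorem pvCount_of_not_isIn (s : String) (h : PySem.Str.isIn "-" s = false) :
    PySem.Str.count s "-" = 0 := by
  rw [pvCount_dash, List.count_eq_zero]
  intro hm
  have h' : PySem.Chars.isIn ['-'] s.toList = false := by simpa using h
  have ht : PySem.Chars.isIn ['-'] s.toList = true :=
    (PySem.Chars.isIn_iff_infix _ _).mpr ((List.singleton_infix_iff '-' s.toList).mpr hm)
  simp [ht] at h'
theorem pvCount_pos_of_isIn (s : String) (h : PySem.Str.isIn "-" s = true) :
    1 ≤ PySem.Str.count s "-" := by
  rw [pvCount_dash]
  have h' : PySem.Chars.isIn ['-'] s.toList = true := by simpa using h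
  have hinf : (['-'] : List Char) <:+: s.toList := (PySem.Chars.isIn_iff_infix _ _).mp h'
  have hmem : '-' ∈ s.toList := hinf.subset (by simp)
  exact List.count_pos_iff.mpr hmem

-- A's merging phase: starting with merge_cnt = j+1, the next j elements are folded
-- into the last cell (clamped at the end of the list)
theorem pvMergeLemma (rf : List String) (j : Nat) :
    ∀ (cs acc : List Int) (idx : Int),
    cs.foldl (pvAStep rf) (acc, idx, (j : Int) + 1)
      = (cs.drop j).foldl (pvAStep rf)
          (pvAddLast acc (((cs.take j).map (· + 3)).sum), idx, (j : Int) + 1 - min j cs.length) := by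
  induction j with
  | zero =>
    intro cs acc idx
    simp [pvAddLast_zero]
  | succ n ih =>
    intro cs acc idx
    cases cs with
    | nil => simp [pvAddLast_zero]
    | cons c t =>
      have hstep : pvAStep rf (acc, idx, ((n : Int) + 1) + 1) c
          = (pvAddLast acc (c + 3), idx, (n : Int) + 1) := by
        simp [pvAStep]
      have hcast : ((n + 1 : Nat) : Int) + 1 = ((n : Int) + 1) + 1 := by push_cast; ring
      rw [List.foldl_cons, hcast, hstep, ih t (pvAddLast acc (c + 3)) idx]
      simp [pvAddLast_addLast, List.take_succ_cons, List.drop_succ_cons]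

-- Main invariant: from any leader state (merge_cnt ≤ 1), A's fold produces acc ++ B's groups
theorem pvMain (rf : List String) : ∀ (n : Nat) (cs : List Int), cs.length = n →
    ∀ (idx : Int) (acc : List Int) (mc : Int), mc ≤ 1 →
    (cs.foldl (pvAStep rf) (acc, idx, mc)).1 = acc ++ pvAltGo rf idx cs := by
  intro n
  induction n using Nat.strong_induction_on with
  | _ n ih =>
    intro cs hlen idx acc mc hmc
    cases cs with
    | nil => simp [pvAltGo]
    | cons c t =>
      have hnpos : ¬ (mc - 1 > 0) := by omega
      by_cases hin : PySem.Str.isIn "-" ((PySem.List.pyGet? rf idx).getD "") = true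
      · -- merged group: span = count ≥ 1
        set row := (PySem.List.pyGet? rf idx).getD "" with hrow
        have hin' : PySem.Chars.isIn ['-'] row.toList = true := by simpa using hin
        have hk := pvCount_pos_of_isIn row hin
        set k := PySem.Str.count row "-" with hkdef
        have hk' : PySem.Chars.count row.toList ['-'] = k := rfl
        have hlt : ¬ (1 : Int) < mc := by omega
        have hstep : pvAStep rf (acc, idx, mc) c = (acc ++ [c], idx + 1, (k : Int)) := by
          simp [pvAStep, hlt, ← hrow, hin', hk']
        have hkcast : (k : Int) = ((k - 1 : Nat) : Int) + 1 := by omega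
        rw [List.foldl_cons, hstep, hkcast, pvMergeLemma rf (k - 1) t (acc ++ [c]) (idx + 1)]
        rw [pvAddLast_append]
        have haltgo : pvAltGo rf idx (c :: t)
            = (c + ((t.take (k - 1)).map (· + 3)).sum)
              :: pvAltGo rf (idx + 1) (t.drop (k - 1)) := by
          rw [pvAltGo]
          have hkne : ¬ k = 0 := by omega
          simp [← hrow, hk', hkne]
        by_cases hcase : k - 1 ≤ t.length
        · have hm : ((k - 1 : Nat) : Int) + 1 - min (k - 1) t.length = 1 := by
            have : min (k - 1) t.length = k - 1 := by omega
            rw [this]; omega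
          rw [hm, ih (t.drop (k - 1)).length (by rw [← hlen]; simp only [List.length_drop, List.length_cons]; omega)
                (t.drop (k - 1)) rfl (idx + 1) (acc ++ [c + ((t.take (k - 1)).map (· + 3)).sum]) 1 le_rfl]
          rw [haltgo]
          simp
        · have hdrop : t.drop (k - 1) = [] := List.drop_eq_nil_of_le (by omega)
          rw [hdrop]
          rw [haltgo, hdrop]
          simp [pvAltGo]
      · -- single column: count = 0, merge_cnt stays ≤ 0
        have hin' : PySem.Str.isIn "-" ((PySem.List.pyGet? rf idx).getD "") = false := by
          simpa using hin
        have hin'' : PySem.Chars.isIn ['-'] ((PySem.List.pyGet? rf idx).getD "").toList = false := by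
          simpa using hin'
        have hlt : ¬ (1 : Int) < mc := by omega
        have hstep : pvAStep rf (acc, idx, mc) c = (acc ++ [c], idx + 1, mc - 1) := by
          simp [pvAStep, hlt, hin'']
        have hk0 : PySem.Str.count ((PySem.List.pyGet? rf idx).getD "") "-" = 0 :=
          pvCount_of_not_isIn _ hin'
        rw [List.foldl_cons, hstep,
            ih t.length (by rw [← hlen]; simp only [List.length_cons]; omega) t rfl (idx + 1) (acc ++ [c]) (mc - 1) (by omega)]
        have hk0' : PySem.Chars.count ((PySem.List.pyGet? rf idx).getD "").toList ['-'] = 0 := hk0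
        have haltgo : pvAltGo rf idx (c :: t) = c :: pvAltGo rf (idx + 1) t := by
          rw [pvAltGo]
          simp [hk0']
        rw [haltgo]
        simp

-- ===== VERDICT (by name: the statement is the Claim_ definition above) =====
theorem merged_cells_spec : Claim_equal_merged_cells := by
  intro rf cs _ _
  unfold Spec_merged_cells merged_cells merged_cells_alt
  exact pvMain rf cs.length cs rfl 0 [] 0 (by omega)
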